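-- pv_equiv track=rewrite | github.com/HaydenInEdinburgh/LintCode | 1868_find_the_number_of_balance_in_the_string.py | get_prefix
-- ===== SOURCE A (Python) =====
-- def get_prefix(S):
--     n = len(S)
--     char_set = set()
--     left = []
--     for i in range(n):
--         char = S[i]
--         char_set.add(char)
--         left.append(len(char_set))
--
--     return left
-- ===== SOURCE B (Python) =====
-- def get_prefix(S):
--     # two passes: indicator of first occurrences, then prefix sums
--     seen = set()
--     indicator = []
--     for ch in S:
--         indicator.append(0 if ch in seen else 1)
--         seen.add(ch)
--     result = []
--     total = 0
--     for b in indicator: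
--         total += b
--         result.append(total)
--     return result
-- ===== Notes on version B (the rewrite author's own statement) =====
-- stated objective: alternative
-- what changed: Replaces the single loop that reads len(set) inline after each insertion with two differently-shaped passes: one building a 0/1 first-occurrence indicator list, and a second accumulating its prefix sums.
import Mathlib
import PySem

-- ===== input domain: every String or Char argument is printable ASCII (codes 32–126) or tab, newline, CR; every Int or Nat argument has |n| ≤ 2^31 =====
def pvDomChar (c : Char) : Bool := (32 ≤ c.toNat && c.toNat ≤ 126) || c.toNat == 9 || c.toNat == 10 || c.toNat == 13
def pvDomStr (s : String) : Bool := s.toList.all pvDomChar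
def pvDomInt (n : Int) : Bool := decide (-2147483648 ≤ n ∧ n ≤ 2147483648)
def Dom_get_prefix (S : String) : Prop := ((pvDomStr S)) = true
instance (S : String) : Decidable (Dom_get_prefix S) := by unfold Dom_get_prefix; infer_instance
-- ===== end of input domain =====

-- B changes the decomposition only: one loop reading len(set) inline (A) vs a
-- first-occurrence indicator pass followed by a prefix-sum pass (B); same O(n) cost.

-- ===== PORT A =====
def get_prefix (S : String) : List Int :=
  let n : Int := PySem.Str.len S
  ((PySem.List.pyRange 0 n 1).foldl
    (fun (st : PySem.Set Char × List Int) i =>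
      let char := PySem.List.pyGetD S.toList i ' '
      let cs := PySem.Set.add st.1 char
      (cs, st.2 ++ [(PySem.Set.len cs : Int)]))
    (PySem.Set.empty, [])).2

-- ===== PORT B =====
def get_prefix_alt (S : String) : List Int :=
  let indicator :=
    (S.toList.foldl
      (fun (st : PySem.Set Char × List Int) ch =>
        (PySem.Set.add st.1 ch,
         st.2 ++ [if PySem.Set.contains st.1 ch then (0 : Int) else 1]))
      (PySem.Set.empty, [])).2
  (indicator.foldl
    (fun (st : Int × List Int) b => (st.1 + b, st.2 ++ [st.1 + b]))
    ((0 : Int), [])).2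

-- ===== PRECONDITION & SPEC =====
def Spec_get_prefix (S : String) (out : List Int) : Prop := out = get_prefix_alt S
instance (S : String) (out : List Int) : Decidable (Spec_get_prefix S out) := by unfold Spec_get_prefix; infer_instance

-- ===== CLAIM (what is proved, stated in full; the proofs are below) =====
def Claim_equal_get_prefix : Prop := ∀ (S : String), Dom_get_prefix S → Spec_get_prefix S (get_prefix S)

-- ===== LEMMAS AND PROOFS =====

-- running len(set) values produced by A's loop
def pvLenList (s : PySem.Set Char) : List Char → List Int
  | [] => []
  | c :: cs => (PySem.Set.len (PySem.Set.add s c) : Int) :: pvLenList (PySem.Set.add s c) cs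

-- indicator values produced by B's first pass
def pvIndList (s : PySem.Set Char) : List Char → List Int
  | [] => []
  | c :: cs => (if PySem.Set.contains s c then (0 : Int) else 1) :: pvIndList (PySem.Set.add s c) cs

-- prefix sums starting from t, produced by B's second pass
def pvPsum (t : Int) : List Int → List Int
  | [] => []
  | b :: bs => (t + b) :: pvPsum (t + b) bs

theorem pvFoldA (cs : List Char) : ∀ (s : PySem.Set Char) (acc : List Int),
    (cs.foldl
      (fun (st : PySem.Set Char × List Int) c =>
        (PySem.Set.add st.1 c, st.2 ++ [(PySem.Set.len (PySem.Set.add st.1 c) : Int)]))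
      (s, acc)).2 = acc ++ pvLenList s cs := by
  induction cs with
  | nil => intro s acc; simp [pvLenList]
  | cons c cs ih => intro s acc; simp only [List.foldl, pvLenList]; rw [ih]; simp

theorem pvFoldI (cs : List Char) : ∀ (s : PySem.Set Char) (acc : List Int),
    (cs.foldl
      (fun (st : PySem.Set Char × List Int) ch =>
        (PySem.Set.add st.1 ch,
         st.2 ++ [if PySem.Set.contains st.1 ch then (0 : Int) else 1]))
      (s, acc)).2 = acc ++ pvIndList s cs := by
  induction cs with
  | nil => intro s acc; simp [pvIndList]
  | cons c cs ih => intro s acc; simp only [List.foldl, pvIndList]; rw [ih]; simp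

theorem pvFoldP (bs : List Int) : ∀ (t : Int) (acc : List Int),
    (bs.foldl (fun (st : Int × List Int) b => (st.1 + b, st.2 ++ [st.1 + b]))
      (t, acc)).2 = acc ++ pvPsum t bs := by
  induction bs with
  | nil => intro t acc; simp [pvPsum]
  | cons b bs ih => intro t acc; simp only [List.foldl, pvPsum]; rw [ih]; simp

theorem pvLen_add (s : PySem.Set Char) (c : Char) :
    (PySem.Set.len (PySem.Set.add s c) : Int)
      = (PySem.Set.len s : Int) + (if PySem.Set.contains s c then (0 : Int) else 1) := by
  by_cases h : c ∈ s
  · simp [PySem.Set.len, h]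
  · simp [PySem.Set.len, h]

theorem pvLen_eq_psum (cs : List Char) : ∀ (s : PySem.Set Char),
    pvLenList s cs = pvPsum (PySem.Set.len s : Int) (pvIndList s cs) := by
  induction cs with
  | nil => intro s; simp [pvLenList, pvIndList, pvPsum]
  | cons c cs ih =>
    intro s
    simp only [pvLenList, pvIndList, pvPsum]
    rw [ih (PySem.Set.add s c), pvLen_add s c]

-- ===== VERDICT (by name: the statement is the Claim_ definition above) =====
theorem get_prefix_spec : Claim_equal_get_prefix := by
  intro S _
  unfold Spec_get_prefix
  simp only [get_prefix, get_prefix_alt]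
  rw [show ((PySem.Str.len S : Int)) = ((S.toList.length : Int)) by simp [PySem.Str.len],
      PySem.List.foldl_pyRange_zero_pyGetD' S.toList ' '
        (fun (st : PySem.Set Char × List Int) c =>
          (PySem.Set.add st.1 c, st.2 ++ [(PySem.Set.len (PySem.Set.add st.1 c) : Int)]))
        (PySem.Set.empty, [])]
  rw [pvFoldA, pvFoldI, pvFoldP]
  simp [pvLen_eq_psum, PySem.Set.empty, PySem.Set.len]
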